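-- pv_equiv track=rewrite | github.com/skitela/potential-robot | BIN/common_guards.py | _seg_is_banned
-- ===== SOURCE A (Python) =====
-- BANNED_TOKENS = {
--     "bid","ask",
--     "ohlc",
--     "open","high","low","close",
--     "price","prices",
--     "rate","rates",
--     "tick","ticks",
--     "quote","quotes",
--     "spread",
-- }
--
-- def _seg_is_banned(seg: str) -> bool:
--     s = seg.lower()
--     if s in BANNED_TOKENS:
--         return True
--     for tok in BANNED_TOKENS:
--         if len(s) > len(tok) and s.startswith(tok):
--             return True
--     return False
-- ===== SOURCE B (Python) =====
-- # Dispatch on the first character: each banned prefix check reduces to a lookup of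
-- # s[:1] in a table of minimal tokens (plurals dropped: "prices" etc. are covered by
-- # their singular prefix), then startswith against at most two candidates.
-- _PREFIXES_BY_FIRST = {
--     "a": ("ask",),
--     "b": ("bid",),
--     "c": ("close",),
--     "h": ("high",),
--     "l": ("low",),
--     "o": ("ohlc", "open"),
--     "p": ("price",),
--     "q": ("quote",),
--     "r": ("rate",),
--     "s": ("spread",),
--     "t": ("tick",),
-- }
--
-- def _seg_is_banned(seg: str) -> bool:
--     s = seg.lower()
--     toks = _PREFIXES_BY_FIRST.get(s[:1], ())
--     return any(s.startswith(t) for t in toks)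
-- ===== Notes on version B (the rewrite author's own statement) =====
-- stated objective: alternative
-- what changed: A tests exact set membership and then scans all 16 tokens with startswith; B dispatches on the first character of the lowered string through a dict mapping it to a minimal token set (redundant plurals removed), testing startswith against at most two candidates.
import Mathlib
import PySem

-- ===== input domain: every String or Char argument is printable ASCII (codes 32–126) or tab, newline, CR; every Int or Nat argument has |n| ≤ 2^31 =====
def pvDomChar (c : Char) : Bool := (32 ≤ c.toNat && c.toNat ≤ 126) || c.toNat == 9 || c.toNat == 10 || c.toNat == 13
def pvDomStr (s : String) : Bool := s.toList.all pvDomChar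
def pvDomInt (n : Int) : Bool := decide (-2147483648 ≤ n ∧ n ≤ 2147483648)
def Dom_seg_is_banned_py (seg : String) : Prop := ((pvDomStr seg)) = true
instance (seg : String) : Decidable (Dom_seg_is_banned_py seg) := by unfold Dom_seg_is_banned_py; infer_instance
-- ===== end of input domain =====

-- B replaces A's membership test + full token scan with a first-character dispatch table of minimal tokens (alternative decomposition; return-value equivalence).


-- ===== PORT A =====
-- BANNED_TOKENS: A's module-level set of distinct string literals
def pvBANNED : List (List Char) :=
  [['b', 'i', 'd'],
   ['a', 's', 'k'],
   ['o', 'h', 'l', 'c'],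
   ['o', 'p', 'e', 'n'],
   ['h', 'i', 'g', 'h'],
   ['l', 'o', 'w'],
   ['c', 'l', 'o', 's', 'e'],
   ['p', 'r', 'i', 'c', 'e'],
   ['p', 'r', 'i', 'c', 'e', 's'],
   ['r', 'a', 't', 'e'],
   ['r', 'a', 't', 'e', 's'],
   ['t', 'i', 'c', 'k'],
   ['t', 'i', 'c', 'k', 's'],
   ['q', 'u', 'o', 't', 'e'],
   ['q', 'u', 'o', 't', 'e', 's'],
   ['s', 'p', 'r', 'e', 'a', 'd']]

def seg_is_banned_py (seg : String) : Bool :=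
  let s := PySem.Chars.lower seg.toList
  if pvBANNED.contains s then true
  else pvBANNED.any (fun tok => decide (tok.length < s.length) && PySem.Chars.startswith s tok)

-- ===== PORT B =====
-- _PREFIXES_BY_FIRST: B's dict from the first character (as a 1-char string) to its minimal tokens
def pvBYFIRST : PySem.Dict (List Char) (List (List Char)) :=
  PySem.Dict.mk
    [ (['a'], [['a', 's', 'k']]),
      (['b'], [['b', 'i', 'd']]),
      (['c'], [['c', 'l', 'o', 's', 'e']]),
      (['h'], [['h', 'i', 'g', 'h']]),
      (['l'], [['l', 'o', 'w']]),
      (['o'], [['o', 'h', 'l', 'c'], ['o', 'p', 'e', 'n']]),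
      (['p'], [['p', 'r', 'i', 'c', 'e']]),
      (['q'], [['q', 'u', 'o', 't', 'e']]),
      (['r'], [['r', 'a', 't', 'e']]),
      (['s'], [['s', 'p', 'r', 'e', 'a', 'd']]),
      (['t'], [['t', 'i', 'c', 'k']]) ]

def seg_is_banned_py_alt (seg : String) : Bool :=
  let s := PySem.Chars.lower seg.toList
  let toks := pvBYFIRST.getD (PySem.Chars.slice s none (some 1)) []
  toks.any (fun t => PySem.Chars.startswith s t)

-- ===== PRECONDITION & SPEC =====
def Spec_seg_is_banned_py (seg : String) (out : Bool) : Prop := out = seg_is_banned_py_alt seg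
instance (seg : String) (out : Bool) : Decidable (Spec_seg_is_banned_py seg out) := by unfold Spec_seg_is_banned_py; infer_instance

-- ===== CLAIM (what is proved, stated in full; the proofs are below) =====
def Claim_equal_seg_is_banned_py : Prop := ∀ (seg : String), Dom_seg_is_banned_py seg → Spec_seg_is_banned_py seg (seg_is_banned_py seg)

-- ===== LEMMAS AND PROOFS =====

-- A's code, characterised: some banned token is a prefix of s
theorem pvA_iff (banned : List (List Char)) (s : List Char) :
    ((if banned.contains s then true
      else banned.any (fun tok => decide (tok.length < s.length) && PySem.Chars.startswith s tok)) = true)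
      ↔ ∃ t ∈ banned, t <+: s := by
  split_ifs with h
  · simp only [true_iff]
    exact ⟨s, by simpa using h, List.prefix_refl s⟩
  · simp only [List.any_eq_true, Bool.and_eq_true, decide_eq_true_eq,
      PySem.Chars.startswith_iff]
    constructor
    · rintro ⟨t, ht, _, hp⟩; exact ⟨t, ht, hp⟩
    · rintro ⟨t, ht, hp⟩
      rcases lt_or_eq_of_le hp.length_le with hlt | heq
      · exact ⟨t, ht, hlt, hp⟩
      · have hts : t = s := by
          have h1 := List.prefix_iff_eq_take.mp hp
          simpa [heq] using h1
        exact absurd (by simp only [List.contains_iff_mem]; exact hts ▸ ht) h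

-- the tokens B's table dispatches over (its flattened values)
def pvMIN : List (List Char) :=
  [['a', 's', 'k'], ['b', 'i', 'd'], ['c', 'l', 'o', 's', 'e'], ['h', 'i', 'g', 'h'],
   ['l', 'o', 'w'], ['o', 'h', 'l', 'c'], ['o', 'p', 'e', 'n'], ['p', 'r', 'i', 'c', 'e'],
   ['q', 'u', 'o', 't', 'e'], ['r', 'a', 't', 'e'], ['s', 'p', 'r', 'e', 'a', 'd'],
   ['t', 'i', 'c', 'k']]

-- every value the table can return consists of pvMIN tokens
theorem pvBYFIRST_values : ∀ p ∈ pvBYFIRST.items, ∀ t ∈ p.2, t ∈ pvMIN := by decide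

-- every pvMIN token is found in the table under its own first character
theorem pvMIN_lookup : ∀ t ∈ pvMIN, t ∈ pvBYFIRST.getD (t.take 1) [] := by decide

theorem pvMIN_ne_nil : ∀ t ∈ pvMIN, t ≠ [] := by decide

-- B's code, characterised: some pvMIN token is a prefix of s
theorem pvB_iff (s : List Char) :
    ((pvBYFIRST.getD (PySem.Chars.slice s none (some 1)) []).any
        (fun t => PySem.Chars.startswith s t) = true)
      ↔ ∃ t ∈ pvMIN, t <+: s := by
  have hsl : PySem.Chars.slice s none (some 1) = s.take 1 := by
    rw [PySem.Chars.slice_eq_listSlice, PySem.List.slice_to _ (by norm_num)]; rfl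
  rw [hsl]
  simp only [List.any_eq_true, PySem.Chars.startswith_iff]
  constructor
  · rintro ⟨t, ht, hp⟩
    rw [PySem.Dict.getD_eq_get?_getD] at ht
    cases hg : pvBYFIRST.get? (s.take 1) with
    | none => rw [hg] at ht; simp at ht
    | some v =>
      rw [hg] at ht
      exact ⟨t, pvBYFIRST_values _ (PySem.Dict.mem_items_of_get?_eq_some pvBYFIRST hg) t ht, hp⟩
  · rintro ⟨t, ht, hp⟩
    refine ⟨t, ?_, hp⟩
    have hkey : s.take 1 = t.take 1 := by
      obtain ⟨u, hu⟩ := hp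
      cases t with
      | nil => exact absurd rfl (pvMIN_ne_nil [] ht)
      | cons c cs => rw [← hu]; rfl
    rw [hkey]
    exact pvMIN_lookup t ht

-- pvMIN and pvBANNED admit the same prefixes
theorem pvMIN_sub : ∀ t ∈ pvMIN, t ∈ pvBANNED := by decide

theorem pvBANNED_covered : ∀ t ∈ pvBANNED, ∃ m ∈ pvMIN, m <+: t := by decide

theorem pv_same_prefixes (s : List Char) :
    (∃ t ∈ pvMIN, t <+: s) ↔ ∃ t ∈ pvBANNED, t <+: s := by
  constructor
  · rintro ⟨t, ht, hp⟩; exact ⟨t, pvMIN_sub t ht, hp⟩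
  · rintro ⟨t, ht, hp⟩
    obtain ⟨m, hm, hmp⟩ := pvBANNED_covered t ht
    exact ⟨m, hm, hmp.trans hp⟩

-- ===== VERDICT (by name: the statement is the Claim_ definition above) =====
theorem seg_is_banned_py_spec : Claim_equal_seg_is_banned_py := by
  intro seg _
  unfold Spec_seg_is_banned_py seg_is_banned_py seg_is_banned_py_alt
  rw [Bool.eq_iff_iff, pvA_iff pvBANNED, pvB_iff, pv_same_prefixes]
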